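-- pv_equiv track=rewrite | github.com/jozef-piechaczek/metaheuristics | lista1/z3/agent_old.py | remove_unnecessary_tiles
-- ===== SOURCE A (Python) =====
-- def remove_unnecessary_tiles(solution):
--     idx = 0
--     while idx < len(solution) - 1:
--         if (solution[idx] == 'U' and solution[idx + 1] == 'D'
--                 or solution[idx] == 'D' and solution[idx + 1] == 'U'
--                 or solution[idx] == 'L' and solution[idx + 1] == 'R'
--                 or solution[idx] == 'R' and solution[idx + 1] == 'L'):
--             solution.pop(idx)
--             solution.pop(idx)
--             idx -= 1
--         idx += 1
--     return solution
-- ===== SOURCE B (Python) =====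
-- CANCEL = {('U', 'D'), ('D', 'U'), ('L', 'R'), ('R', 'L')}
--
-- def remove_unnecessary_tiles(solution):
--     out = []
--     i = 0
--     n = len(solution)
--     while i < n:
--         if i + 1 < n and (solution[i], solution[i + 1]) in CANCEL:
--             i += 2
--         else:
--             out.append(solution[i])
--             i += 1
--     return out
-- ===== Notes on version B (the rewrite author's own statement) =====
-- stated objective: alternative
-- what changed: Replaced A's in-place while loop with list.pop(idx) calls and index backtracking by a single forward pass over the unmodified input that skips canceling adjacent pairs and appends kept moves to a fresh output list (and leaves the argument unmutated).
import Mathlib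
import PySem

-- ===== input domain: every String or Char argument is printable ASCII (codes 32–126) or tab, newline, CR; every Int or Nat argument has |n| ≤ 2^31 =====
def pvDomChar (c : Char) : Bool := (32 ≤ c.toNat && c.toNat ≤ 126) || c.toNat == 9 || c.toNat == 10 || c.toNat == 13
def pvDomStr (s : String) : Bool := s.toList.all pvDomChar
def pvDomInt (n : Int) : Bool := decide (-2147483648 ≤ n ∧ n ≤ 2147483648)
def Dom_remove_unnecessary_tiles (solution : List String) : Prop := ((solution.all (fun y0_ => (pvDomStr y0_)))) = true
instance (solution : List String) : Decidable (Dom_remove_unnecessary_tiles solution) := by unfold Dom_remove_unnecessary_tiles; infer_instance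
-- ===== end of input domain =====

-- B replaces A's in-place pop-based loop by a single forward pass building a new output list
-- (A mutates its argument in place; the equivalence proved here is about the return value only).


-- ===== PORT A =====
-- whether two adjacent moves cancel (the four-way disjunction in A's if)
def pvCancel (a b : String) : Bool :=
  (a == "U" && b == "D") || (a == "D" && b == "U") ||
  (a == "L" && b == "R") || (a == "R" && b == "L")

-- A's while loop; list.pop(idx) (idx always in range here) = List.eraseIdx idx (exact);
-- 'idx -= 1; idx += 1' after the two pops leaves idx unchanged, so the state is (solution, idx).
def pvLoopA (solution : List String) (idx : Nat) : List String :=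
  if h : idx + 1 < solution.length then
    if pvCancel (solution.getD idx "") (solution.getD (idx + 1) "") then
      pvLoopA ((solution.eraseIdx idx).eraseIdx idx) idx
    else
      pvLoopA solution (idx + 1)
  else solution
termination_by solution.length - idx
decreasing_by
  · simp only [List.length_eraseIdx]
    repeat' split
    all_goals omega
  · omega

def remove_unnecessary_tiles (solution : List String) : List String := pvLoopA solution 0

-- ===== PORT B =====
-- B's while loop: forward pass over the fixed input, appending kept moves to out
def pvLoopB (solution : List String) (out : List String) (i : Nat) : List String :=
  if i < solution.length then
    if i + 1 < solution.length && pvCancel (solution.getD i "") (solution.getD (i + 1) "") then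
      pvLoopB solution out (i + 2)
    else
      pvLoopB solution (out ++ [solution.getD i ""]) (i + 1)
  else out
termination_by solution.length - i

def remove_unnecessary_tiles_alt (solution : List String) : List String := pvLoopB solution [] 0

-- ===== PRECONDITION & SPEC =====
def Spec_remove_unnecessary_tiles (solution : List String) (out : List String) : Prop := out = remove_unnecessary_tiles_alt solution
instance (solution : List String) (out : List String) : Decidable (Spec_remove_unnecessary_tiles solution out) := by unfold Spec_remove_unnecessary_tiles; infer_instance

-- ===== CLAIM (what is proved, stated in full; the proofs are below) =====
def Claim_equal_remove_unnecessary_tiles : Prop := ∀ (solution : List String), Dom_remove_unnecessary_tiles solution → Spec_remove_unnecessary_tiles solution (remove_unnecessary_tiles solution)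

-- ===== LEMMAS AND PROOFS =====

-- reference recursion both loops compute (proof-only helper)
def pvG : List String → List String
  | x :: y :: rest => if pvCancel x y then pvG rest else x :: pvG (y :: rest)
  | s => s

theorem pvG_short (s : List String) (h : s.length ≤ 1) : pvG s = s := by
  match s with
  | [] => rfl
  | [_] => rfl
  | _ :: _ :: _ => simp at h

theorem pvG_cons_cons (x y : String) (r : List String) :
    pvG (x :: y :: r) = if pvCancel x y then pvG r else x :: pvG (y :: r) := rfl

theorem pvLoopB_eq (solution out : List String) (i : Nat) :
    pvLoopB solution out i = out ++ pvG (solution.drop i) := by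
  fun_induction pvLoopB solution out i with
  | case1 out i h hc ih =>
    have hlt : i + 1 < solution.length := by
      rcases Bool.and_eq_true_iff.mp hc with ⟨h1, _⟩
      simpa using h1
    have hcan : pvCancel solution[i] solution[i+1] = true := by
      rcases Bool.and_eq_true_iff.mp hc with ⟨_, h2⟩
      rwa [List.getD_eq_getElem solution "" h, List.getD_eq_getElem solution "" hlt] at h2
    rw [ih, List.drop_eq_getElem_cons h, List.drop_eq_getElem_cons hlt, pvG_cons_cons,
      if_pos hcan]
  | case2 out i h hc ih =>
    rw [ih, List.drop_eq_getElem_cons h, List.getD_eq_getElem solution "" h,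
      List.append_assoc]
    congr 1
    rw [Bool.not_eq_true] at hc
    by_cases hl : i + 1 < solution.length
    · have hcan : pvCancel solution[i] solution[i+1] = false := by
        rcases Bool.and_eq_false_iff.mp hc with h1 | h2
        · simp at h1; omega
        · rwa [List.getD_eq_getElem solution "" h, List.getD_eq_getElem solution "" hl] at h2
      rw [List.drop_eq_getElem_cons hl, pvG_cons_cons, if_neg (by simp [hcan]),
        ← List.drop_eq_getElem_cons hl]
      rfl
    · have : solution.drop (i + 1) = [] := List.drop_eq_nil_of_le (by omega)
      rw [this, pvG_short _ (by simp), pvG_short _ (by simp)]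
      simp
  | case3 out i h =>
    have h0 : solution.drop i = [] := List.drop_eq_nil_of_le (by omega)
    rw [h0, pvG_short _ (by simp)]
    simp

theorem erase_twice (s : List String) (idx : Nat) (h : idx + 1 < s.length) :
    (s.eraseIdx idx).eraseIdx idx = s.take idx ++ s.drop (idx + 2) := by
  have hl : (s.take idx).length = idx := by simp; omega
  rw [List.eraseIdx_eq_take_drop_succ, List.eraseIdx_eq_take_drop_succ, List.take_left' hl]
  congr 1
  have hd : (List.take idx s ++ List.drop (idx + 1) s).drop (idx + 1)
      = ((List.take idx s ++ List.drop (idx + 1) s).drop idx).drop 1 := by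
    rw [List.drop_drop]
  rw [hd, List.drop_left' hl, List.drop_drop]

theorem pvLoopA_eq (solution : List String) (idx : Nat) :
    pvLoopA solution idx = solution.take idx ++ pvG (solution.drop idx) := by
  fun_induction pvLoopA solution idx with
  | case1 solution idx h hc ih =>
    have h0 : idx < solution.length := by omega
    have hcan : pvCancel solution[idx] solution[idx+1] = true := by
      rwa [List.getD_eq_getElem solution "" h0, List.getD_eq_getElem solution "" h] at hc
    rw [ih, erase_twice solution idx h]
    have hl : (solution.take idx).length = idx := by simp; omega
    rw [List.take_left' hl, List.drop_left' hl]
    congr 1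
    rw [List.drop_eq_getElem_cons h0, List.drop_eq_getElem_cons h, pvG_cons_cons, if_pos hcan]
  | case2 solution idx h hc ih =>
    have h0 : idx < solution.length := by omega
    have hcan : pvCancel solution[idx] solution[idx+1] = false := by
      rw [List.getD_eq_getElem solution "" h0, List.getD_eq_getElem solution "" h] at hc
      simpa using hc
    rw [ih]
    rw [List.drop_eq_getElem_cons h0, List.drop_eq_getElem_cons h, pvG_cons_cons,
      if_neg (by simp [hcan]), ← List.drop_eq_getElem_cons h]
    have ht : List.take (idx + 1) solution = List.take idx solution ++ [solution[idx]] := by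
      rw [List.take_add_one, List.getElem?_eq_getElem h0]
      rfl
    rw [ht, List.append_assoc]
    rfl
  | case3 solution idx h =>
    have : pvG (solution.drop idx) = solution.drop idx :=
      pvG_short _ (by simp; omega)
    rw [this, List.take_append_drop]

-- ===== VERDICT (by name: the statement is the Claim_ definition above) =====
theorem remove_unnecessary_tiles_spec : Claim_equal_remove_unnecessary_tiles := by
  intro solution _
  unfold Spec_remove_unnecessary_tiles remove_unnecessary_tiles remove_unnecessary_tiles_alt
  rw [pvLoopA_eq, pvLoopB_eq]
  simp
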